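-- pv_equiv track=rewrite | github.com/AlibabaResearch/DAMO-ConvAI | unid2t/data_preprocess/cosql/convert_cosql_to_unified_graph.py | convert_table_into_triple
-- ===== SOURCE A (Python) =====
-- def convert_table_into_triple(table, results_map: dict, is_lower=True):
--     if table is None:
--         return ['none'], [(0, 'Col', 0)]
--     if len(table) == 1:
--         n_col = len(table[0])
--         table.append(['none' for i in range(n_col)])
--
--     table = [row for row in table if row is not None]
--
--     linear_nodes = []
--     node_ids = []
--     triples = []
--
--     # [Row] [Col]
--     for row_idx, row in enumerate(table):
--         ids = []
--         for col_id, value in enumerate(row):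
--             if results_map is not None and value in results_map.keys():
--                 value = results_map[value]
--
--             head_idx = len(linear_nodes)
--             ids.append(head_idx)
--             linear_nodes.append(value)
--
--             # same column
--             for pre_same_col_idx in range(col_id):
--
--                 previous_same_col_value = row[pre_same_col_idx]
--                 if results_map is not None and previous_same_col_value in results_map.keys():
--                     previous_same_col_value = results_map[previous_same_col_value]
--                 assert previous_same_col_value in linear_nodes
--
--                 tail_idx = ids[pre_same_col_idx]
--
--                 triples.append((head_idx, '[Col]', tail_idx))
--
--             # same row
--             for pre_same_row_idx in range(row_idx):
--                 previous_same_row_value = table[pre_same_row_idx][col_id]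
--                 if results_map is not None and previous_same_row_value in results_map.keys():
--                     previous_same_row_value = results_map[previous_same_row_value]
--                 assert previous_same_row_value in linear_nodes
--
--                 tail_idx = node_ids[pre_same_row_idx][col_id]
--
--                 triples.append((head_idx, '[Row]', tail_idx))
--         node_ids.append(ids)
--
--     linear_nodes = [str(node) for node in linear_nodes]
--     return linear_nodes, triples
-- ===== SOURCE B (Python) =====
-- def convert_table_into_triple(table, results_map: dict, is_lower=True):
--     if table is None:
--         return ['none'], [(0, 'Col', 0)]
--     if len(table) == 1:
--         table.append(['none'] * len(table[0]))
--     rows = [row for row in table if row is not None]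
--
--     # nodes: one flattening comprehension with the substitution applied inline
--     if results_map is None:
--         linear_nodes = [str(v) for row in rows for v in row]
--     else:
--         linear_nodes = [str(results_map.get(v, v)) for row in rows for v in row]
--
--     # prefix[i] = flat index of the first cell of row i (cumulative widths)
--     prefix = []
--     total = 0
--     for row in rows:
--         prefix.append(total)
--         total += len(row)
--
--     # single loop over the flat cell index h, keeping a row pointer (i, base);
--     # every edge index is pure arithmetic: head h, column tails base..h-1,
--     # row tails prefix[p] + (h - base)
--     triples = []
--     i = 0
--     base = 0
--     for h in range(total):
--         while i + 1 < len(prefix) and h >= prefix[i + 1]: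
--             i += 1
--             base = prefix[i]
--         j = h - base
--         for t in range(base, h):
--             triples.append((h, '[Col]', t))
--         for p in range(i):
--             triples.append((h, '[Row]', prefix[p] + j))
--     return linear_nodes, triples
-- ===== Notes on version B (the rewrite author's own statement) =====
-- stated objective: faster
-- what changed: A's nested row/column loops maintain per-row id lists, a node_ids grid and per-triple 'in linear_nodes' membership asserts; B instead builds a cumulative-width prefix table and runs ONE loop over the flat cell index h with a row-pointer (i, base), computing every edge endpoint by pure arithmetic (head h, column tails base..h-1, row tails prefix[p] + (h - base)) with no id lists, no grid and no membership scans.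
import Mathlib
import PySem

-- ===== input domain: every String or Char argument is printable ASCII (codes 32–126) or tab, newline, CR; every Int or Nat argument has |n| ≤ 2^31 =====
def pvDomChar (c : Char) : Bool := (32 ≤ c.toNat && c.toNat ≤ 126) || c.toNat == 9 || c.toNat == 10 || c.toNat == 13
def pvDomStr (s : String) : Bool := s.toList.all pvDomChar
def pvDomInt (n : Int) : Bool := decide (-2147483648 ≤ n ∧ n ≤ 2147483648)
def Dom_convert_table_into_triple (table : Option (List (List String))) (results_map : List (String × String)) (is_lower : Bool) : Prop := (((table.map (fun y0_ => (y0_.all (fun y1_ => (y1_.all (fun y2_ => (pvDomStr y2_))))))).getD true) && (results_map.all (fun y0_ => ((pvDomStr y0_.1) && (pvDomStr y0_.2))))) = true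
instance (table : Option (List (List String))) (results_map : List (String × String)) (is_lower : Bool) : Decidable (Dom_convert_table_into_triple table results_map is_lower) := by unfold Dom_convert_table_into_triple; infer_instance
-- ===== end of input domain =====

-- B replaces A's nested row/column loops (which maintain per-row id lists, a node_ids grid
-- and per-triple membership asserts) by a single loop over the flat cell index with a
-- cumulative-width prefix table: every edge endpoint is pure arithmetic on that table.
-- Python A and B both mutate a single-row input list in place (append of the 'none' row);
-- the equivalence proved here is about the return value only (the mutation is identical anyway).

-- ===== PORT A =====
-- Inner loop of A over the cells of one row. State: (linear_nodes, ids, triples);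
-- colId is the enumerate counter. The two Python `assert`s always hold (each asserted
-- value was appended to linear_nodes earlier inside Pre_) and the values they recompute
-- are used nowhere else, so they are dropped. ids[k] (k < colId) is always in range and
-- ported as getD; table[p][col_id] / node_ids[p][col_id] raise IndexError in Python
-- exactly outside Pre_, so the getD default 0 is never the value inside Pre_.
def aCells (rm : List (String × String)) (nodeIds : List (List Int)) :
    List String → Nat → List String → List Int → List (Int × String × Int) →
    List String × List Int × List (Int × String × Int)
  | [], _, linear, ids, triples => (linear, ids, triples)
  | v :: rest, colId, linear, ids, triples =>
    let value := (rm.lookup v).getD v  -- `value in results_map.keys()` then `results_map[value]`: first match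
    let headIdx : Int := linear.length
    let ids' := ids ++ [headIdx]
    let linear' := linear ++ [value]
    let colT := (List.range colId).map fun k => (headIdx, "[Col]", ids.getD k 0)
    let rowT := (List.range nodeIds.length).map fun p =>
      (headIdx, "[Row]", (nodeIds.getD p []).getD colId 0)
    aCells rm nodeIds rest (colId + 1) linear' ids' (triples ++ colT ++ rowT)

-- Outer loop of A over the rows; row_idx = nodeIds.length at each step.
def aRows (rm : List (String × String)) :
    List (List String) → List String → List (List Int) → List (Int × String × Int) →
    List String × List (List Int) × List (Int × String × Int)
  | [], linear, nodeIds, triples => (linear, nodeIds, triples)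
  | row :: rest, linear, nodeIds, triples =>
    let r := aCells rm nodeIds row 0 linear [] triples
    aRows rm rest r.1 (nodeIds ++ [r.2.1]) r.2.2

def convert_table_into_triple (table : Option (List (List String))) (results_map : List (String × String)) (is_lower : Bool) : List String × (List (Int × String × Int)) :=
  match table with
  | none => (["none"], [((0 : Int), "Col", (0 : Int))])
  | some t =>
    -- single-row case: append a 'none' row of the same width
    let t := if t.length == 1 then t ++ [List.replicate (t.headD []).length "none"] else t
    -- `[row for row in table if row is not None]`: rows are List String here, never None
    let r := aRows results_map t [] [] []
    -- `[str(node) for node in linear_nodes]`: str is the identity on strings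
    (r.1, r.2.2)

-- ===== PORT B =====
-- results_map.get(value, value); str(...) is the identity on strings; the Python
-- `results_map is None` guard has no counterpart here (a dict is never None under the
-- type convention)
def bSubst (rm : List (String × String)) (v : String) : String :=
  (rm.lookup v).getD v

-- the prefix loop: `prefix.append(total); total += len(row)` for each row
def bPrefix : List (List String) → Int → List Int × Int
  | [], total => ([], total)
  | row :: rest, total =>
    let r := bPrefix rest (total + row.length)
    (total :: r.1, r.2)

-- the `while i + 1 < len(prefix) and h >= prefix[i+1]` pointer advance;
-- structural recursion on the fuel `P.length - (i+1)` (the loop's own bound),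
-- so the definition stays kernel-reducible
def bAdvanceGo (P : List Int) (h : Int) : Nat → Nat → Int → Nat × Int
  | 0, i, base => (i, base)
  | k + 1, i, base =>
    if P.getD (i + 1) 0 ≤ h then bAdvanceGo P h k (i + 1) (P.getD (i + 1) 0)
    else (i, base)

def bAdvance (P : List Int) (h : Int) (i : Nat) (base : Int) : Nat × Int :=
  bAdvanceGo P h (P.length - (i + 1)) i base

-- the two emission loops of one flat index h: `for t in range(base, h)` then `for p in range(i)`
def bEmit (P : List Int) (i : Nat) (base h : Int) : List (Int × String × Int) :=
  (PySem.List.pyRange base h 1).map (fun t => (h, "[Col]", t)) ++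
  (List.range i).map (fun p => (h, "[Row]", P.getD p 0 + (h - base)))

-- the single loop `for h in range(total)` with pointer state (i, base)
def bLoop (P : List Int) : List Int → Nat → Int → List (Int × String × Int) → List (Int × String × Int)
  | [], _, _, acc => acc
  | h :: hs, i, base, acc =>
    let s := bAdvance P h i base
    bLoop P hs s.1 s.2 (acc ++ bEmit P s.1 s.2 h)

def convert_table_into_triple_alt (table : Option (List (List String))) (results_map : List (String × String)) (is_lower : Bool) : List String × (List (Int × String × Int)) :=
  match table with
  | none => (["none"], [((0 : Int), "Col", (0 : Int))])
  | some t =>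
    let rows := if t.length == 1 then t ++ [List.replicate (t.headD []).length "none"] else t
    let nodes := rows.flatMap (fun row => row.map (bSubst results_map))
    let pr := bPrefix rows 0
    (nodes, bLoop pr.1 (PySem.List.pyRange 0 pr.2 1) 0 0 [])

-- ===== PRECONDITION & SPEC =====
-- Pre_ excludes exactly the inputs where Python A raises: a non-None table whose row
-- lengths are not (index-wise) non-increasing makes A's table[p][col_id] access raise
-- IndexError. A returns on every input admitted here.
def Pre_convert_table_into_triple (table : Option (List (List String))) (results_map : List (String × String)) (is_lower : Bool) : Prop :=
  (table.all fun t =>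
    decide (List.Pairwise (fun a b : Nat => b ≤ a) (t.map List.length))) = true
instance (table : Option (List (List String))) (results_map : List (String × String)) (is_lower : Bool) : Decidable (Pre_convert_table_into_triple table results_map is_lower) := by unfold Pre_convert_table_into_triple; infer_instance

def pvWitness_convert_table_into_triple : Option (List (List String)) × (List (String × String)) × Bool :=
  (some [["a", "b"], ["c", "d"]], [("a", "x")], true)

def Spec_convert_table_into_triple (table : Option (List (List String))) (results_map : List (String × String)) (is_lower : Bool) (out : List String × (List (Int × String × Int))) : Prop := out = convert_table_into_triple_alt table results_map is_lower
instance (table : Option (List (List String))) (results_map : List (String × String)) (is_lower : Bool) (out : List String × (List (Int × String × Int))) : Decidable (Spec_convert_table_into_triple table results_map is_lower out) := by unfold Spec_convert_table_into_triple; infer_instance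

-- ===== CLAIM (what is proved, stated in full; the proofs are below) =====
def Claim_equal_convert_table_into_triple : Prop := ∀ (table : Option (List (List String))) (results_map : List (String × String)) (is_lower : Bool), Dom_convert_table_into_triple table results_map is_lower → Pre_convert_table_into_triple table results_map is_lower → Spec_convert_table_into_triple table results_map is_lower (convert_table_into_triple table results_map is_lower)

-- ===== LEMMAS AND PROOFS =====

-- the flat indices of a row of length n starting at offset s
def idsOf (s n : Nat) : List Int := (List.range n).map fun j => ((s + j : Nat) : Int)

-- the remaining flat indices after j cells of a row starting at s (n cells remain)
def restHeads (s j n : Nat) : List Int := (List.range n).map fun t => ((s + j + t : Nat) : Int)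

-- the whole node-index grid from cumulative offsets
def pvGrid : List (List String) → Nat → List (List Int)
  | [], _ => []
  | r :: rs, s => idsOf s r.length :: pvGrid rs (s + r.length)

-- the triples of one cell (i, j) with flat index `head`, read off the grid (A's shape)
def bCell (nids : List (List Int)) (i : Nat) (ids : List Int) (j : Nat) (head : Int) :
    List (Int × String × Int) :=
  ((List.range j).map fun k => (head, "[Col]", ids.getD k 0)) ++
  ((List.range i).map fun p => (head, "[Row]", (nids.getD p []).getD j 0))

def bRowGo (nids : List (List Int)) (i : Nat) (ids : List Int) :
    List Int → Nat → List (Int × String × Int)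
  | [], _ => []
  | head :: rest, j => bCell nids i ids j head ++ bRowGo nids i ids rest (j + 1)

def bPass2 (full : List (List Int)) : List (List Int) → Nat → List (Int × String × Int)
  | [], _ => []
  | ids :: rest, i => bRowGo full i ids ids 0 ++ bPass2 full rest (i + 1)

-- the prefix table as a pure function of the widths
def pOf : List Nat → Int → List Int
  | [], _ => []
  | w :: ws, t => t :: pOf ws (t + w)

-- the common normal form of the triple list: per row, per cell, arithmetic indices
def nfRow (P : List Int) (i s : Nat) (w : Nat) : List (Int × String × Int) :=
  (List.range w).flatMap fun j : Nat => bEmit P i (s : Int) ((s : Int) + (j : Int))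

def nfAll (P : List Int) : List Nat → Nat → Nat → List (Int × String × Int)
  | [], _, _ => []
  | w :: ws, i, s => nfRow P i s w ++ nfAll P ws (i + 1) (s + w)

theorem idsOf_zero (s : Nat) : idsOf s 0 = [] := by simp [idsOf]

theorem idsOf_snoc (s n : Nat) : idsOf s n ++ [((s + n : Nat) : Int)] = idsOf s (n + 1) := by
  simp [idsOf, List.range_succ]

theorem idsOf_getD (s : Nat) {k n : Nat} (h : k < n) :
    (idsOf s n).getD k 0 = ((s + k : Nat) : Int) := by
  rw [idsOf, List.getD_eq_getElem?_getD, List.getElem?_map, List.getElem?_range h]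
  rfl

theorem restHeads_cons (s j n : Nat) :
    restHeads s j (n + 1) = ((s + j : Nat) : Int) :: restHeads s (j + 1) n := by
  simp only [restHeads, List.range_succ_eq_map, List.map_cons, List.map_map, Function.comp_def]
  rw [List.cons.injEq]
  exact ⟨by simp, List.map_congr_left fun t _ => by omega⟩

theorem restHeads_zero (s n : Nat) : restHeads s 0 n = idsOf s n := by
  simp [restHeads, idsOf]

theorem getD_append_left {α : Type} (l l' : List α) (d : α) {n : Nat} (h : n < l.length) :
    (l ++ l').getD n d = l.getD n d := by
  rw [List.getD_eq_getElem?_getD, List.getD_eq_getElem?_getD, List.getElem?_append_left h]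

theorem bRowGo_congr {nids1 nids2 : List (List Int)} {i : Nat}
    (h : ∀ p, p < i → nids1.getD p [] = nids2.getD p []) (ids : List Int) :
    ∀ heads j, bRowGo nids1 i ids heads j = bRowGo nids2 i ids heads j := by
  intro heads
  induction heads with
  | nil => intro j; rfl
  | cons head rest ih =>
    intro j
    simp only [bRowGo, ih]
    congr 1
    unfold bCell
    congr 1
    apply List.map_congr_left
    intro p hp
    rw [h p (List.mem_range.mp hp)]

theorem aCells_spec (rm : List (String × String)) (nids : List (List Int)) (s : Nat) :
    ∀ (rest : List String) (j : Nat) (linear : List String) (triples : List (Int × String × Int)),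
      linear.length = s + j →
      aCells rm nids rest j linear (idsOf s j) triples =
        (linear ++ rest.map (bSubst rm), idsOf s (j + rest.length),
         triples ++ bRowGo nids nids.length (idsOf s (j + rest.length)) (restHeads s j rest.length) j) := by
  intro rest
  induction rest with
  | nil =>
    intro j linear triples _
    simp [aCells, restHeads, bRowGo]
  | cons v rest' ih =>
    intro j linear triples hlen
    show aCells rm nids (v :: rest') j linear (idsOf s j) triples = _
    rw [aCells]
    have hhead : ((linear.length : Nat) : Int) = ((s + j : Nat) : Int) := by rw [hlen]
    have hids : idsOf s j ++ [((linear.length : Nat) : Int)] = idsOf s (j + 1) := by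
      rw [hhead]; exact idsOf_snoc s j
    rw [hids]
    have hb : (List.lookup v rm).getD v = bSubst rm v := rfl
    rw [hb]
    rw [ih (j + 1) (linear ++ [bSubst rm v]) _ (by simp [hlen]; omega)]
    simp only [Prod.mk.injEq]
    refine ⟨by simp [bSubst], ?_, ?_⟩
    · show idsOf s (j + 1 + rest'.length) = idsOf s (j + (rest'.length + 1))
      congr 1; omega
    · -- triples component
      simp only [List.length_cons]
      rw [restHeads_cons, bRowGo]
      have hcell : bCell nids nids.length (idsOf s (j + (rest'.length + 1))) j ((s + j : Nat) : Int) =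
          ((List.range j).map fun k => (((linear.length : Nat) : Int), "[Col]", (idsOf s j).getD k 0)) ++
          ((List.range nids.length).map fun p =>
            (((linear.length : Nat) : Int), "[Row]", (nids.getD p []).getD j 0)) := by
        unfold bCell
        congr 1
        · apply List.map_congr_left
          intro k hk
          have hk' := List.mem_range.mp hk
          rw [idsOf_getD s (by omega : k < j + (rest'.length + 1)), idsOf_getD s hk', hhead]
        · apply List.map_congr_left
          intro p _
          rw [hhead]
      rw [hcell, show j + 1 + rest'.length = j + (rest'.length + 1) from by omega]
      simp [List.append_assoc]

theorem aRows_spec (rm : List (String × String)) :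
    ∀ (rest : List (List String)) (linear : List String) (nids : List (List Int))
      (triples : List (Int × String × Int)),
      aRows rm rest linear nids triples =
        (linear ++ (rest.map (fun r => r.map (bSubst rm))).flatten,
         nids ++ pvGrid rest linear.length,
         triples ++ bPass2 (nids ++ pvGrid rest linear.length) (pvGrid rest linear.length) nids.length) := by
  intro rest
  induction rest with
  | nil => intro linear nids triples; simp [aRows, pvGrid, bPass2]
  | cons row rest' ih =>
    intro linear nids triples
    rw [aRows]
    have hc := aCells_spec rm nids linear.length row 0 linear triples (by omega)
    rw [idsOf_zero] at hc
    rw [hc, restHeads_zero]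
    simp only [Nat.zero_add]
    rw [ih]
    have hgrid : pvGrid (row :: rest') linear.length =
        idsOf linear.length row.length :: pvGrid rest' (linear.length + row.length) := rfl
    have hlen : (linear ++ row.map (bSubst rm)).length = linear.length + row.length := by simp
    simp only [Prod.mk.injEq]
    refine ⟨by simp, ?_, ?_⟩
    · rw [hgrid, hlen, List.append_assoc]; rfl
    · rw [hgrid, hlen]
      have hfull : nids ++ [idsOf linear.length row.length] ++ pvGrid rest' (linear.length + row.length) =
          nids ++ (idsOf linear.length row.length :: pvGrid rest' (linear.length + row.length)) := by
        rw [List.append_assoc]; rfl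
      rw [hfull]
      set full := nids ++ (idsOf linear.length row.length :: pvGrid rest' (linear.length + row.length)) with hfulldef
      have hcongr : bRowGo nids nids.length (idsOf linear.length row.length)
            (idsOf linear.length row.length) 0 =
          bRowGo full nids.length (idsOf linear.length row.length)
            (idsOf linear.length row.length) 0 := by
        apply bRowGo_congr
        intro p hp
        rw [hfulldef, getD_append_left _ _ _ hp]
      rw [hcongr]
      have hlen2 : (nids ++ [idsOf linear.length row.length]).length = nids.length + 1 := by simp
      rw [hlen2]
      show triples ++ _ ++ _ = triples ++ bPass2 full (_ :: _) nids.length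
      rw [bPass2, List.append_assoc]


theorem pOf_length (ws : List Nat) (t : Int) : (pOf ws t).length = ws.length := by
  induction ws generalizing t with
  | nil => rfl
  | cons w ws ih => simp [pOf, ih]

theorem pOf_getD (ws : List Nat) (t : Int) (p : Nat) (hp : p < ws.length) :
    (pOf ws t).getD p 0 = t + (((ws.take p).sum : Nat) : Int) := by
  induction ws generalizing t p with
  | nil => simp at hp
  | cons w ws ih =>
    cases p with
    | zero => simp [pOf]
    | succ p =>
      have := ih (t + w) p (by simpa using hp)
      simp only [pOf, List.getD_cons_succ, this, List.take_succ_cons, List.sum_cons]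
      push_cast
      ring

theorem pvGrid_getD (rows : List (List String)) (s p : Nat) (hp : p < rows.length) :
    (pvGrid rows s).getD p [] =
      idsOf (s + ((rows.map List.length).take p).sum) ((rows.getD p []).length) := by
  induction rows generalizing s p with
  | nil => simp at hp
  | cons r rs ih =>
    cases p with
    | zero => simp [pvGrid]
    | succ p =>
      have := ih (s + r.length) p (by simpa using hp)
      simp only [pvGrid, List.getD_cons_succ, this, List.map_cons, List.take_succ_cons,
        List.sum_cons]
      congr 1
      omega

theorem flatMap_range_shift {α : Type} (f : Int → List α) (c : Int) (n : Nat) :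
    (List.range (n + 1)).flatMap (fun q : Nat => f (c + (q : Int))) =
      f c ++ (List.range n).flatMap (fun q : Nat => f ((c + 1) + (q : Int))) := by
  rw [List.range_succ_eq_map, List.flatMap_cons, List.flatMap_map]
  simp only [Nat.cast_zero, add_zero]
  congr 1
  apply List.flatMap_congr
  intro q _
  congr 1
  push_cast
  ring

theorem cellEq (rows : List (List String)) (i s j w : Nat)
    (hj : j < w) (hI : i ≤ rows.length)
    (hw : ∀ p, p < i → w ≤ (rows.getD p []).length) :
    bCell (pvGrid rows 0) i (idsOf s w) j ((s + j : Nat) : Int) =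
      bEmit (pOf (rows.map List.length) 0) i (s : Int) ((s : Int) + (j : Int)) := by
  unfold bCell bEmit
  congr 1
  · rw [PySem.List.pyRange_one]
    have ht : ((s : Int) + (j : Int) - (s : Int)).toNat = j := by omega
    rw [ht, List.map_map]
    apply List.map_congr_left
    intro k hk
    have hk' := List.mem_range.mp hk
    rw [idsOf_getD s (by omega : k < w)]
    simp only [Function.comp_def, Prod.mk.injEq]
    refine ⟨by push_cast; ring, by trivial, by push_cast; ring⟩
  · apply List.map_congr_left
    intro p hp
    have hp' := List.mem_range.mp hp
    have hplen : p < rows.length := lt_of_lt_of_le hp' hI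
    rw [pvGrid_getD rows 0 p hplen, idsOf_getD _ (lt_of_lt_of_le hj (hw p hp')),
      pOf_getD _ _ p (by simpa using hplen)]
    simp only [Prod.mk.injEq]
    refine ⟨by push_cast; ring, by trivial, by push_cast; ring⟩

theorem rowEq (rows : List (List String)) (i s w : Nat)
    (hI : i ≤ rows.length)
    (hw : ∀ p, p < i → w ≤ (rows.getD p []).length) :
    ∀ (m j : Nat), j + m = w →
      bRowGo (pvGrid rows 0) i (idsOf s w) (restHeads s j m) j =
        (List.range m).flatMap
          (fun q : Nat => bEmit (pOf (rows.map List.length) 0) i (s : Int) ((s : Int) + (j : Int) + (q : Int))) := by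
  intro m
  induction m with
  | zero => intro j hj0; simp [restHeads, bRowGo]
  | succ m ih =>
    intro j hjm
    rw [restHeads_cons, bRowGo, cellEq rows i s j w (by omega) hI hw, ih (j + 1) (by omega)]
    rw [flatMap_range_shift (fun h => bEmit (pOf (rows.map List.length) 0) i (s : Int) h)
      ((s : Int) + (j : Int)) m]
    rfl

theorem nfAll_zeros (P : List Int) : ∀ (ws : List Nat) (i s : Nat),
    (∀ w ∈ ws, w = 0) → nfAll P ws i s = [] := by
  intro ws
  induction ws with
  | nil => intro i s _; rfl
  | cons w ws ih =>
    intro i s h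
    have hw : w = 0 := h w (by simp)
    rw [nfAll, ih (i + 1) (s + w) (fun x hx => h x (by simp [hx]))]
    simp [nfRow, hw]

theorem passb (rows : List (List String))
    (hmono : (rows.map List.length).Pairwise (fun a b => b ≤ a)) :
    ∀ (rs : List (List String)) (i s : Nat),
      rs = rows.drop i → s = ((rows.map List.length).take i).sum →
      bPass2 (pvGrid rows 0) (pvGrid rs s) i =
        nfAll (pOf (rows.map List.length) 0) (rs.map List.length) i s := by
  intro rs
  induction rs with
  | nil => intro i s _ _; rfl
  | cons r rs' ih =>
    intro i s hdrop hsum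
    have hlen := congrArg List.length hdrop
    simp only [List.length_drop, List.length_cons] at hlen
    have hi : i < rows.length := by omega
    have hri : rows[i]? = some r := by
      have h0 : (rows.drop i)[0]? = some r := by rw [← hdrop]; rfl
      rwa [List.getElem?_drop, Nat.add_zero] at h0
    have hdrop' : rows.drop (i + 1) = rs' := by
      have : (rows.drop i).drop 1 = rs' := by rw [← hdrop]; rfl
      rwa [List.drop_drop] at this
    have hw : ∀ p, p < i → r.length ≤ (rows.getD p []).length := by
      intro p hp
      have hle := (List.pairwise_iff_getElem.mp hmono) p i (by simp; omega)
        (by simpa using hi) hp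
      simp only [List.getElem_map] at hle
      rw [List.getD_eq_getElem?_getD, List.getElem?_eq_getElem (by omega : p < rows.length)]
      have hgi : rows[i] = r := by
        have := List.getElem?_eq_getElem (l := rows) (i := i) hi
        rw [hri] at this
        exact (Option.some.injEq _ _).mp this.symm
      rw [hgi] at hle
      exact hle
    show bPass2 (pvGrid rows 0) (idsOf s r.length :: pvGrid rs' (s + r.length)) i = _
    rw [bPass2]
    have hrow := rowEq rows i s r.length (le_of_lt hi) hw r.length 0 (by omega)
    rw [restHeads_zero] at hrow
    have hgi : rows[i] = r := by
      have hh := List.getElem?_eq_getElem (l := rows) (i := i) hi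
      rw [hri] at hh
      exact ((Option.some.injEq _ _).mp hh.symm)
    have hs1 : s + r.length = ((rows.map List.length).take (i + 1)).sum := by
      rw [List.sum_take_succ _ _ (by simpa using hi)]
      simp only [List.getElem_map, hgi, hsum]
    rw [hrow, ih (i + 1) (s + r.length) hdrop'.symm hs1]
    rfl

theorem bPrefix_spec (rows : List (List String)) :
    ∀ t : Int, bPrefix rows t =
      (pOf (rows.map List.length) t, t + (((rows.map List.length).sum : Nat) : Int)) := by
  induction rows with
  | nil => intro t; simp [bPrefix, pOf]
  | cons r rs ih =>
    intro t
    simp only [bPrefix, ih, pOf, List.map_cons, List.sum_cons, Prod.mk.injEq]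
    refine ⟨trivial, by push_cast; ring⟩

theorem bAdvance_stop (P : List Int) (h : Int) (i : Nat) (b : Int)
    (hc : ¬ (i + 1 < P.length ∧ P.getD (i + 1) 0 ≤ h)) : bAdvance P h i b = (i, b) := by
  rw [bAdvance]
  rcases hk : P.length - (i + 1) with _ | k
  · rfl
  · have h1 : i + 1 < P.length := by omega
    rw [bAdvanceGo]
    rw [if_neg (fun h2 => hc ⟨h1, h2⟩)]

theorem bAdvance_step (P : List Int) (h : Int) (i : Nat) (b : Int)
    (h1 : i + 1 < P.length) (h2 : P.getD (i + 1) 0 ≤ h) :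
    bAdvance P h i b = bAdvance P h (i + 1) (P.getD (i + 1) 0) := by
  rw [bAdvance, bAdvance]
  rcases hk : P.length - (i + 1) with _ | k
  · omega
  · rw [bAdvanceGo, if_pos h2]
    congr 1
    omega

theorem bLoop_run (P : List Int) :
    ∀ (n : Nat) (c : Int) (hs : List Int) (i : Nat) (b : Int) (acc : List (Int × String × Int)),
      (∀ h : Int, c ≤ h → h < c + (n : Int) → bAdvance P h i b = (i, b)) →
      bLoop P (PySem.List.pyRange c (c + (n : Int)) 1 ++ hs) i b acc =
        bLoop P hs i b (acc ++ (List.range n).flatMap (fun j : Nat => bEmit P i b (c + (j : Int)))) := by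
  intro n
  induction n with
  | zero =>
    intro c hs i b acc _
    rw [show c + ((0 : Nat) : Int) = c by simp, PySem.List.pyRange_one_eq_nil (le_refl c)]
    simp
  | succ n ih =>
    intro c hs i b acc hstat
    have hcons := PySem.List.pyRange_one_cons (a := c) (b := c + ((n + 1 : Nat) : Int))
      (by push_cast; omega)
    rw [hcons, List.cons_append, bLoop]
    have hadv : bAdvance P c i b = (i, b) := hstat c (le_refl c) (by push_cast; omega)
    rw [hadv]
    have hsh : c + ((n + 1 : Nat) : Int) = (c + 1) + (n : Int) := by push_cast; ring
    rw [hsh, ih (c + 1) hs i b (acc ++ bEmit P i b c)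
      (fun h h1 h2 => hstat h (by omega) (by push_cast at h2 ⊢; omega))]
    rw [flatMap_range_shift (fun h => bEmit P i b h) c n]
    rw [List.append_assoc]

theorem loopAll (rows : List (List String))
    (hmono : (rows.map List.length).Pairwise (fun a b => b ≤ a)) :
    ∀ (rs : List (List String)) (i s : Nat) (i0 : Nat) (b0 : Int) (acc : List (Int × String × Int)),
      rs = rows.drop i → s = ((rows.map List.length).take i).sum →
      (∀ r rs', rs = r :: rs' → 0 < r.length →
        bAdvance (pOf (rows.map List.length) 0) (s : Int) i0 b0 = (i, (s : Int))) →
      bLoop (pOf (rows.map List.length) 0)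
          (PySem.List.pyRange (s : Int) (((rows.map List.length).sum : Nat) : Int) 1) i0 b0 acc =
        acc ++ nfAll (pOf (rows.map List.length) 0) (rs.map List.length) i s := by
  intro rs
  induction rs with
  | nil =>
    intro i s i0 b0 acc hdrop hsum _
    have hi : rows.length ≤ i := by
      have := congrArg List.length hdrop
      simp only [List.length_drop, List.length_nil] at this
      omega
    have hs : s = (rows.map List.length).sum := by
      rw [hsum, List.take_of_length_le (by simpa using hi)]
    rw [hs, PySem.List.pyRange_one_eq_nil (le_refl _)]
    simp [bLoop, nfAll]
  | cons r rs' ih =>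
    intro i s i0 b0 acc hdrop hsum hentry
    have hlen := congrArg List.length hdrop
    simp only [List.length_drop, List.length_cons] at hlen
    have hi : i < rows.length := by omega
    have hri : rows[i]? = some r := by
      have h0 : (rows.drop i)[0]? = some r := by rw [← hdrop]; rfl
      rwa [List.getElem?_drop, Nat.add_zero] at h0
    have hgi : rows[i] = r := by
      have hh := List.getElem?_eq_getElem (l := rows) (i := i) hi
      rw [hri] at hh
      exact ((Option.some.injEq _ _).mp hh.symm)
    have hdrop' : rows.drop (i + 1) = rs' := by
      have : (rows.drop i).drop 1 = rs' := by rw [← hdrop]; rfl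
      rwa [List.drop_drop] at this
    have hs1 : s + r.length = ((rows.map List.length).take (i + 1)).sum := by
      rw [List.sum_take_succ _ _ (by simpa using hi)]
      simp only [List.getElem_map, hgi, hsum]
    by_cases hr : 0 < r.length
    · -- nonempty row: one pointer advance at the first flat index, then the block
      have hsle : s + r.length ≤ (rows.map List.length).sum := by
        conv_rhs => rw [← List.take_append_drop (i + 1) (rows.map List.length)]
        rw [List.sum_append, ← hs1]
        omega
      have hPlen : (pOf (rows.map List.length) 0).length = rows.length := by
        rw [pOf_length]; simp
      have hPi1 : i + 1 < rows.length → (pOf (rows.map List.length) 0).getD (i + 1) 0 =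
          ((s + r.length : Nat) : Int) := by
        intro h
        rw [pOf_getD _ _ (i + 1) (by simpa using h), ← hs1]
        simp
      have hsplit : PySem.List.pyRange (s : Int) (((rows.map List.length).sum : Nat) : Int) 1 =
          PySem.List.pyRange (s : Int) ((s + r.length : Nat) : Int) 1 ++
          PySem.List.pyRange ((s + r.length : Nat) : Int) (((rows.map List.length).sum : Nat) : Int) 1 :=
        PySem.List.pyRange_one_append _ _ _ (by push_cast; omega) (by exact_mod_cast hsle)
      have hcons : PySem.List.pyRange (s : Int) ((s + r.length : Nat) : Int) 1 =
          (s : Int) :: PySem.List.pyRange ((s : Int) + 1) ((s + r.length : Nat) : Int) 1 :=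
        PySem.List.pyRange_one_cons (by push_cast; omega)
      rw [hsplit, hcons, List.cons_append, bLoop]
      have hadv := hentry r rs' rfl hr
      rw [hadv]
      have hstat : ∀ h : Int, (s : Int) + 1 ≤ h → h < ((s : Int) + 1) + ((r.length - 1 : Nat) : Int) →
          bAdvance (pOf (rows.map List.length) 0) h i (s : Int) = (i, (s : Int)) := by
        intro h h1 h2
        apply bAdvance_stop
        rintro ⟨hc1, hc2⟩
        rw [hPlen] at hc1
        rw [hPi1 hc1] at hc2
        push_cast at h2 hc2
        omega
      have hrw : ((s + r.length : Nat) : Int) = ((s : Int) + 1) + ((r.length - 1 : Nat) : Int) := by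
        push_cast; omega
      rw [hrw, bLoop_run _ (r.length - 1) ((s : Int) + 1) _ i (s : Int) _ hstat, ← hrw]
      have hentry' : ∀ r' rs'', rs' = r' :: rs'' → 0 < r'.length →
          bAdvance (pOf (rows.map List.length) 0) ((s + r.length : Nat) : Int) i (s : Int) =
            (i + 1, ((s + r.length : Nat) : Int)) := by
        intro r' rs'' hrs' hr'
        have hlen' := congrArg List.length (hdrop'.trans hrs')
        simp only [List.length_drop, List.length_cons] at hlen'
        have hi1 : i + 1 < rows.length := by omega
        have hri' : rows[i + 1]? = some r' := by
          have h0 : (rows.drop (i + 1))[0]? = some r' := by rw [hdrop', hrs']; rfl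
          rwa [List.getElem?_drop, Nat.add_zero] at h0
        have hgi' : rows[i + 1] = r' := by
          have hh := List.getElem?_eq_getElem (l := rows) (i := i + 1) hi1
          rw [hri'] at hh
          exact ((Option.some.injEq _ _).mp hh.symm)
        rw [bAdvance_step _ _ _ _ (by rwa [hPlen]) (by rw [hPi1 hi1])]
        rw [hPi1 hi1]
        apply bAdvance_stop
        rintro ⟨hc1, hc2⟩
        rw [hPlen] at hc1
        have hs2 : ((rows.map List.length).take (i + 2)).sum = s + r.length + r'.length := by
          rw [List.sum_take_succ _ _ (by simp only [List.length_map]; omega)]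
          simp only [List.getElem_map, hgi', ← hs1]
        rw [pOf_getD _ _ (i + 2) (by simp only [List.length_map] at hc1 ⊢; omega)] at hc2
        rw [hs2] at hc2
        push_cast at hc2
        omega
      rw [ih (i + 1) (s + r.length) i (s : Int) _ hdrop'.symm hs1 hentry']
      show _ = acc ++ (nfRow _ i s r.length ++ nfAll _ (rs'.map List.length) (i + 1) (s + r.length))
      have hnf : nfRow (pOf (rows.map List.length) 0) i s r.length =
          bEmit (pOf (rows.map List.length) 0) i (s : Int) (s : Int) ++
          (List.range (r.length - 1)).flatMap
            (fun j : Nat => bEmit (pOf (rows.map List.length) 0) i (s : Int) (((s : Int) + 1) + (j : Int))) := by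
        unfold nfRow
        have hr1 : r.length = (r.length - 1) + 1 := by omega
        rw [hr1, flatMap_range_shift (fun h => bEmit (pOf (rows.map List.length) 0) i (s : Int) h)
          (s : Int) (r.length - 1)]
        rfl
      rw [hnf]
      simp [List.append_assoc]
    · -- empty row: all remaining rows are empty, the flat range is exhausted
      have hzero : ∀ x ∈ (rows.map List.length).drop i, x = 0 := by
        intro x hx
        obtain ⟨t, ht, hxt⟩ := List.getElem_of_mem hx
        rw [List.getElem_drop] at hxt
        rcases Nat.eq_zero_or_pos t with ht0 | ht0
        · subst ht0
          simp only [Nat.add_zero, List.getElem_map, hgi] at hxt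
          omega
        · have htl : i + t < (rows.map List.length).length := by
            simp only [List.length_drop, List.length_map] at ht ⊢
            omega
          have hle := (List.pairwise_iff_getElem.mp hmono) i (i + t) (by simpa using hi)
            htl (by omega)
          simp only [List.getElem_map, hgi] at hle
          simp only [List.getElem_map] at hxt
          omega
      have hs : s = (rows.map List.length).sum := by
        conv_rhs => rw [← List.take_append_drop i (rows.map List.length)]
        rw [List.sum_append, List.sum_eq_zero hzero, hsum]
        omega
      rw [hs, PySem.List.pyRange_one_eq_nil (le_refl _)]
      have hz' : ∀ w ∈ (r :: rs').map List.length, w = 0 := by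
        intro w hw
        apply hzero
        have hdm : (rows.map List.length).drop i = (r :: rs').map List.length := by
          rw [← List.map_drop, ← hdrop]
        rw [hdm]
        exact hw
      rw [bLoop, nfAll_zeros _ _ i _ hz']
      simp

-- ===== VERDICT (by name: the statement is the Claim_ definition above) =====
theorem convert_table_into_triple_spec : Claim_equal_convert_table_into_triple := by
  intro table results_map is_lower _ hpre
  unfold Spec_convert_table_into_triple
  cases table with
  | none => rfl
  | some t =>
    unfold convert_table_into_triple convert_table_into_triple_alt
    simp only
    have hmono : ((if t.length == 1 then t ++ [List.replicate (t.headD []).length "none"]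
        else t).map List.length).Pairwise (fun a b : Nat => b ≤ a) := by
      have hp : List.Pairwise (fun a b : Nat => b ≤ a) (t.map List.length) := by
        unfold Pre_convert_table_into_triple at hpre
        simp only [Option.all_some, decide_eq_true_eq] at hpre
        exact hpre
      by_cases h1 : t.length == 1
      · rw [if_pos h1]
        have hl : t.length = 1 := by simpa using h1
        rcases t with _ | ⟨r, rest⟩
        · simp at hl
        · rcases rest with _ | ⟨r2, rest'⟩
          · simp [List.pairwise_cons]
          · simp at hl
      · rw [if_neg h1]; exact hp
    set rows := if t.length == 1 then t ++ [List.replicate (t.headD []).length "none"] else t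
      with hrowsdef
    rw [aRows_spec]
    rw [bPrefix_spec rows 0]
    simp only [List.nil_append, List.length_nil, zero_add]
    have hA := passb rows hmono rows 0 0 (by simp) (by simp)
    have hentry0 : ∀ r rs', rows = r :: rs' → 0 < r.length →
        bAdvance (pOf (rows.map List.length) 0) ((0 : Nat) : Int) 0 0 = (0, ((0 : Nat) : Int)) := by
      intro r rs' hr0 hrpos
      apply bAdvance_stop
      rintro ⟨hc1, hc2⟩
      rw [pOf_length, List.length_map] at hc1
      rw [pOf_getD _ _ 1 (by simpa using hc1)] at hc2
      rw [hr0] at hc2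
      simp only [List.map_cons, List.take_succ_cons, List.take_zero, List.sum_cons,
        List.sum_nil, Nat.add_zero] at hc2
      omega
    have hB := loopAll rows hmono rows 0 0 0 0 [] (by simp) (by simp) hentry0
    simp only [Nat.cast_zero] at hB
    rw [hB, hA]
    simp [List.flatMap_def]
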